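-- pv_equiv track=rewrite | github.com/ra000sh-jpg/auto_blog_generator | modules/utils/onboarding_helper.py | build_mbti_prior_scores
-- ===== SOURCE A (Python) =====
-- from typing import Dict, List, Tuple
--
-- _MBTI_LETTER_DELTAS: Dict[str, Dict[str, int]] = {
--     "E": {"distance": 10, "density": -2},
--     "I": {"distance": -10, "density": 2},
--     "S": {"evidence": 10, "density": 4},
--     "N": {"evidence": -6, "density": 8},
--     "T": {"criticism": 10},
--     "F": {"criticism": -10},
--     "J": {"structure": 10, "density": 4},
--     "P": {"structure": -10, "density": -4},
-- }
--
-- def clamp_score(value: int) -> int: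
--     """점수를 0~100 범위로 제한한다."""
--     return max(0, min(100, int(value)))
--
-- def build_mbti_prior_scores(mbti_code: str) -> Dict[str, int]:
--     """MBTI로부터 5차원 prior 점수를 계산한다."""
--     base = {
--         "structure": 50,
--         "evidence": 50,
--         "distance": 50,
--         "criticism": 50,
--         "density": 50,
--     }
--     for letter in mbti_code:
--         for dimension, delta in _MBTI_LETTER_DELTAS.get(letter, {}).items():
--             base[dimension] = clamp_score(base[dimension] + delta)
--     return base
-- ===== SOURCE B (Python) =====
-- from typing import Dict, List, Tuple
--
-- _MBTI_LETTER_DELTAS: Dict[str, Dict[str, int]] = {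
--     "E": {"distance": 10, "density": -2},
--     "I": {"distance": -10, "density": 2},
--     "S": {"evidence": 10, "density": 4},
--     "N": {"evidence": -6, "density": 8},
--     "T": {"criticism": 10},
--     "F": {"criticism": -10},
--     "J": {"structure": 10, "density": 4},
--     "P": {"structure": -10, "density": -4},
-- }
--
-- _DIMENSIONS = ("structure", "evidence", "distance", "criticism", "density")
--
-- def clamp_score(value: int) -> int:
--     return max(0, min(100, int(value)))
--
-- def build_mbti_prior_scores(mbti_code: str) -> Dict[str, int]:
--     """Transposed computation: group the deltas by dimension first, then reduce
--     each dimension's own delta list with per-step clamping."""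
--     index: Dict[str, List[int]] = {}
--     for letter in mbti_code:
--         for dimension, delta in _MBTI_LETTER_DELTAS.get(letter, {}).items():
--             index[dimension] = index.get(dimension, []) + [delta]
--     result: Dict[str, int] = {}
--     for dimension in _DIMENSIONS:
--         value = 50
--         for delta in index.get(dimension, []):
--             value = clamp_score(value + delta)
--         result[dimension] = value
--     return result
-- ===== Notes on version B (the rewrite author's own statement) =====
-- stated objective: alternative
-- what changed: B transposes the control flow: one pass builds an inverted dimension-to-deltas index, then each of the five dimensions is produced by folding its own delta list with per-step clamping, instead of A's letter-by-letter in-place updates of the score dict.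
import Mathlib
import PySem

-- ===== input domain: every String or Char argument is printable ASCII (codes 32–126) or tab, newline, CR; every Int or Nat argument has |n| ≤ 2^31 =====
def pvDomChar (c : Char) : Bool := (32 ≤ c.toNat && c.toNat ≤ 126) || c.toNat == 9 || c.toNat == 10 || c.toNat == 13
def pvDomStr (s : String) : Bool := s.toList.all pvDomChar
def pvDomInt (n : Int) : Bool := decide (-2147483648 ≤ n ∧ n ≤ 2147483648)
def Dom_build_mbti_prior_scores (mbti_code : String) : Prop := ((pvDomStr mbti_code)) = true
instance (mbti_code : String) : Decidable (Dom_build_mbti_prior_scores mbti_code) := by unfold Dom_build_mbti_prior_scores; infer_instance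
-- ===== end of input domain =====

-- B transposes the computation: it groups the deltas by dimension in one pass, then folds each
-- dimension's own delta list with per-step clamping (objective: alternative decomposition, same cost).

-- ===== PORT A =====
def clamp_score (value : Int) : Int := max 0 (min 100 value)

def mbtiLetterDeltas : PySem.Dict String (PySem.Dict String Int) :=
  PySem.Dict.ofList
    [ ("E", PySem.Dict.ofList [("distance", 10), ("density", -2)])
    , ("I", PySem.Dict.ofList [("distance", -10), ("density", 2)])
    , ("S", PySem.Dict.ofList [("evidence", 10), ("density", 4)])
    , ("N", PySem.Dict.ofList [("evidence", -6), ("density", 8)])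
    , ("T", PySem.Dict.ofList [("criticism", 10)])
    , ("F", PySem.Dict.ofList [("criticism", -10)])
    , ("J", PySem.Dict.ofList [("structure", 10), ("density", 4)])
    , ("P", PySem.Dict.ofList [("structure", -10), ("density", -4)]) ]

-- 'base[dimension] = clamp_score(base[dimension] + delta)' is ported as Dict.modify with default 0;
-- this is exact because every dimension key of the deltas table is already a key of base
-- (Python never hits the KeyError / default case).
def build_mbti_prior_scores (mbti_code : String) : List (String × Int) :=
  let base : PySem.Dict String Int :=
    PySem.Dict.ofList
      [("structure", 50), ("evidence", 50), ("distance", 50), ("criticism", 50), ("density", 50)]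
  (mbti_code.toList.foldl
    (fun base c =>
      (((mbtiLetterDeltas.get? (String.singleton c)).getD PySem.Dict.empty).items).foldl
        (fun base p => base.modify p.1 0 (fun v => clamp_score (v + p.2))) base)
    base).items

-- ===== PORT B =====
def mbtiDimensions : List String :=
  ["structure", "evidence", "distance", "criticism", "density"]

def build_mbti_prior_scores_alt (mbti_code : String) : List (String × Int) :=
  let index : PySem.Dict String (List Int) :=
    mbti_code.toList.foldl
      (fun idx c =>
        (((mbtiLetterDeltas.get? (String.singleton c)).getD PySem.Dict.empty).items).foldl
          (fun idx p => idx.modify p.1 [] (fun l => l ++ [p.2])) idx)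
      PySem.Dict.empty
  mbtiDimensions.map
    (fun dim => (dim, (index.getD dim []).foldl (fun v d => clamp_score (v + d)) 50))

-- ===== PRECONDITION & SPEC =====
def Spec_build_mbti_prior_scores (mbti_code : String) (out : List (String × Int)) : Prop := out = build_mbti_prior_scores_alt mbti_code
instance (mbti_code : String) (out : List (String × Int)) : Decidable (Spec_build_mbti_prior_scores mbti_code out) := by unfold Spec_build_mbti_prior_scores; infer_instance

-- ===== CLAIM (what is proved, stated in full; the proofs are below) =====
def Claim_equal_build_mbti_prior_scores : Prop := ∀ (mbti_code : String), Dom_build_mbti_prior_scores mbti_code → Spec_build_mbti_prior_scores mbti_code (build_mbti_prior_scores mbti_code)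

-- ===== LEMMAS AND PROOFS =====

-- the per-letter delta items, and their concatenation over the whole code
def itemsOf (c : Char) : List (String × Int) :=
  ((mbtiLetterDeltas.get? (String.singleton c)).getD PySem.Dict.empty).items

-- the nested letter/items loop is a single fold over the flattened item list
lemma foldl_itemsOf {σ : Type} (g : σ → (String × Int) → σ) (cs : List Char) (st : σ) :
    cs.foldl (fun st c =>
        (((mbtiLetterDeltas.get? (String.singleton c)).getD PySem.Dict.empty).items).foldl g st) st
      = (cs.flatMap itemsOf).foldl g st := by
  induction cs generalizing st with
  | nil => rfl
  | cons c cs ih => simp [List.flatMap_cons, List.foldl_append, ih, itemsOf]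

-- every dimension produced by the deltas table is one of the five dimensions
lemma itemsOf_keys_mem (c : Char) : ∀ p ∈ itemsOf c, p.1 ∈ mbtiDimensions := by
  unfold itemsOf
  cases hg : mbtiLetterDeltas.get? (String.singleton c) with
  | none => intro p hp; simp [PySem.Dict.empty] at hp
  | some d =>
    have hd : (String.singleton c, d) ∈
        ([ ("E", PySem.Dict.ofList [("distance", 10), ("density", -2)])
         , ("I", PySem.Dict.ofList [("distance", -10), ("density", 2)])
         , ("S", PySem.Dict.ofList [("evidence", 10), ("density", 4)])
         , ("N", PySem.Dict.ofList [("evidence", -6), ("density", 8)])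
         , ("T", PySem.Dict.ofList [("criticism", 10)])
         , ("F", PySem.Dict.ofList [("criticism", -10)])
         , ("J", PySem.Dict.ofList [("structure", 10), ("density", 4)])
         , ("P", PySem.Dict.ofList [("structure", -10), ("density", -4)]) ] :
           List (String × PySem.Dict String Int)) :=
      PySem.Dict.mem_items_of_get?_eq_some _ hg
    simp only [List.mem_cons, List.not_mem_nil, or_false, Prod.mk.injEq] at hd
    rcases hd with ⟨_, rfl⟩|⟨_, rfl⟩|⟨_, rfl⟩|⟨_, rfl⟩|⟨_, rfl⟩|⟨_, rfl⟩|⟨_, rfl⟩|⟨_, rfl⟩ <;> decide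

-- a fold of per-key modifications reads back, at key k, as a fold over the items filtered to k
lemma getD_foldl_modify_clamp (L : List (String × Int)) (d : PySem.Dict String Int) (k : String) :
    (L.foldl (fun d p => d.modify p.1 0 (fun v => clamp_score (v + p.2))) d).getD k 0
      = (L.filter (fun p => p.1 == k)).foldl (fun v p => clamp_score (v + p.2)) (d.getD k 0) := by
  induction L generalizing d with
  | nil => rfl
  | cons p L ih =>
    by_cases h : p.1 = k
    · simp [h, ih]
    · rw [List.foldl_cons, ih, PySem.Dict.getD_modify_of_ne _ _ _ (Ne.symm h)]
      simp [h]

-- modifying only existing keys leaves the key list unchanged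
lemma keys_foldl_modify_of_mem {ν : Type} (L : List (String × Int)) (d0 : ν)
    (f : Int → ν → ν) (d : PySem.Dict String ν) (h : ∀ p ∈ L, p.1 ∈ d.keys) :
    (L.foldl (fun d p => d.modify p.1 d0 (fun v => f p.2 v)) d).keys = d.keys := by
  rw [PySem.Dict.keys_foldl_modify_key L (fun p => p.1) d0 (fun _ p v => f p.2 v) d]
  rw [PySem.Set.update_eq_append_filter]
  have hnil : (List.filter (fun y => !PySem.Set.contains d.keys y)
      (PySem.Set.ofList (L.map (fun p => p.1)))) = [] := by
    rw [List.filter_eq_nil_iff]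
    intro a ha
    have : a ∈ L.map (fun p => p.1) := (PySem.Set.mem_ofList _ _).mp ha
    obtain ⟨p, hp, rfl⟩ := List.mem_map.mp this
    simp [PySem.Set.contains, h p hp]
  rw [hnil, List.append_nil]

theorem build_mbti_prior_scores_spec : Claim_equal_build_mbti_prior_scores := by
  intro s _
  unfold Spec_build_mbti_prior_scores build_mbti_prior_scores build_mbti_prior_scores_alt
  simp only
  rw [foldl_itemsOf, foldl_itemsOf]
  set L := s.toList.flatMap itemsOf with hL
  have hmem : ∀ p ∈ L, p.1 ∈ mbtiDimensions := by
    intro p hp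
    obtain ⟨c, _, hc⟩ := List.mem_flatMap.mp hp
    exact itemsOf_keys_mem c p hc
  set base : PySem.Dict String Int :=
    PySem.Dict.ofList
      [("structure", 50), ("evidence", 50), ("distance", 50), ("criticism", 50), ("density", 50)] with hbase
  have hkeys : base.keys = mbtiDimensions := by rw [hbase]; rfl
  have hnodup : base.keys.Nodup := by rw [hkeys]; decide
  have hkeysA : (L.foldl (fun d p => d.modify p.1 0 (fun v => clamp_score (v + p.2))) base).keys
      = mbtiDimensions := by
    rw [keys_foldl_modify_of_mem L 0 (fun δ v => clamp_score (v + δ)) base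
      (by intro p hp; rw [hkeys]; exact hmem p hp), hkeys]
  rw [PySem.Dict.items_eq_map_keys _ (by rw [hkeysA]; decide) 0, hkeysA]
  apply List.map_congr_left
  intro k hk
  rw [getD_foldl_modify_clamp, PySem.Dict.getD_foldl_modify_append, PySem.Dict.getD_empty,
    List.nil_append, List.foldl_map]
  have hb : base.getD k 0 = 50 := by fin_cases hk <;> rfl
  rw [hb]
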